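-- pv_equiv track=rewrite | github.com/Tidyresonnance8/projet-python | mission7/QC_creation_dictionnaire_valeurs_max.py | create_dict_max
-- ===== SOURCE A (Python) =====
-- def create_dict_max(l):
--     dict = {}
--     for x, y in l:
--         if x in dict:
--             dict[x] = max(dict[x],y)
--         else:
--             dict[x] = y
--     return dict
-- ===== SOURCE B (Python) =====
-- def create_dict_max(l):
--     groups = {}
--     for x, y in l:
--         groups.setdefault(x, []).append(y)
--     return {x: max(vals) for x, vals in groups.items()}
-- ===== Notes on version B (the rewrite author's own statement) =====
-- stated objective: alternative
-- what changed: B groups all values per key into lists in one pass and then reduces each list with max in a separate comprehension, instead of A's single loop maintaining a running max per key.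
import Mathlib
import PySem

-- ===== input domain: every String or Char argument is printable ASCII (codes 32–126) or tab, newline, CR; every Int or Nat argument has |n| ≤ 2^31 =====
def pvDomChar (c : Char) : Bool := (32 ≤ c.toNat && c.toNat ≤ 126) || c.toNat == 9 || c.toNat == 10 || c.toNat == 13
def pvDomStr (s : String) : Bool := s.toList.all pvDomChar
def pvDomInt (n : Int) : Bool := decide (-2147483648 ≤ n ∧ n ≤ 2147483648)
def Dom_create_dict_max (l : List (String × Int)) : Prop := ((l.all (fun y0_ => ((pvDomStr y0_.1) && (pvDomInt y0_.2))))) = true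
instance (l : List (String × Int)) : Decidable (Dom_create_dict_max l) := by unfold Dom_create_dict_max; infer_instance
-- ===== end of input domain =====

-- B groups all values per key into lists in one pass, then reduces each list with max in a second pass; A keeps a running max per key. Equal on all inputs.

-- ===== PORT A =====
def create_dict_max (l : List (String × Int)) : List (String × Int) :=
  (l.foldl (fun d p =>
      if d.contains p.1 then d.insert p.1 (max (d.getD p.1 0) p.2)
      else d.insert p.1 p.2)
    (PySem.Dict.empty : PySem.Dict String Int)).items

-- ===== PORT B =====
-- max(vals): vals is always nonempty here (Python max raises on []); the [] case is unreachable
def pyMaxList (vs : List Int) : Int :=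
  match vs with
  | [] => 0
  | h :: t => t.foldl max h

def create_dict_max_alt (l : List (String × Int)) : List (String × Int) :=
  -- groups.setdefault(x, []).append(y)  ==  groups[x] = groups.get(x, []) + [y], i.e. Dict.modify
  ((l.foldl (fun d p => d.modify p.1 [] (· ++ [p.2]))
      (PySem.Dict.empty : PySem.Dict String (List Int))).items.map
    (fun p => (p.1, pyMaxList p.2)))

-- ===== PRECONDITION & SPEC =====
def Spec_create_dict_max (l : List (String × Int)) (out : List (String × Int)) : Prop := out = create_dict_max_alt l
instance (l : List (String × Int)) (out : List (String × Int)) : Decidable (Spec_create_dict_max l out) := by unfold Spec_create_dict_max; infer_instance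

-- ===== CLAIM (what is proved, stated in full; the proofs are below) =====
def Claim_equal_create_dict_max : Prop := ∀ (l : List (String × Int)), Dom_create_dict_max l → Spec_create_dict_max l (create_dict_max l)

-- ===== LEMMAS AND PROOFS =====

-- A's fold step, and the values of l at key k in order
def pvStepA (d : PySem.Dict String Int) (p : String × Int) : PySem.Dict String Int :=
  if d.contains p.1 then d.insert p.1 (max (d.getD p.1 0) p.2) else d.insert p.1 p.2

def pvVals (l : List (String × Int)) (k : String) : List Int :=
  (l.filter (fun p => p.1 == k)).map (·.2)

def pvRun (o : Option Int) (vs : List Int) : Option Int :=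
  vs.foldl (fun o y => some (match o with | some v => max v y | none => y)) o

lemma pvStepA_eq : pvStepA = fun (d : PySem.Dict String Int) (p : String × Int) =>
    d.insert p.1 (if d.contains p.1 then max (d.getD p.1 0) p.2 else p.2) := by
  funext d p
  unfold pvStepA
  by_cases h : d.contains p.1 <;> simp [h]

lemma pvStepA_get?_self (d : PySem.Dict String Int) (k : String) (y : Int) :
    (pvStepA d (k, y)).get? k = some (match d.get? k with | some v => max v y | none => y) := by
  unfold pvStepA
  by_cases h : d.contains k
  · have hv : (d.get? k).isSome := by rw [← PySem.Dict.contains_eq_isSome_get? d k]; exact h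
    obtain ⟨v, hv⟩ := Option.isSome_iff_exists.mp hv
    simp [h, PySem.Dict.get?_insert_self, hv, PySem.Dict.getD_of_get?_eq_some d (0 : Int) hv]
  · have hn : d.get? k = none := (PySem.Dict.get?_eq_none_iff_contains d k).mpr (by simpa using h)
    simp [h, PySem.Dict.get?_insert_self, hn]

lemma pvStepA_get?_ne (d : PySem.Dict String Int) (p : String × Int) (k : String) (h : k ≠ p.1) :
    (pvStepA d p).get? k = d.get? k := by
  unfold pvStepA
  by_cases hc : d.contains p.1 <;> simp [hc, PySem.Dict.get?_insert_of_ne d _ h]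

lemma pvFoldA_get? (l : List (String × Int)) (d : PySem.Dict String Int) (k : String) :
    (l.foldl pvStepA d).get? k = pvRun (d.get? k) (pvVals l k) := by
  induction l generalizing d with
  | nil => simp [pvVals, pvRun]
  | cons p t ih =>
    by_cases h : p.1 = k
    · obtain ⟨x, y⟩ := p
      subst h
      simp only [List.foldl_cons, ih, pvVals, List.filter_cons, List.map_cons, pvRun,
        List.foldl_cons, beq_self_eq_true, if_pos]
      rw [pvStepA_get?_self]
    · simp only [List.foldl_cons, ih]
      rw [pvStepA_get?_ne _ _ _ (Ne.symm h)]
      simp [pvVals, (by simpa using h : ¬ (p.1 == k) = true)]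

lemma pvRun_some (vs : List Int) (a : Int) : pvRun (some a) vs = some (vs.foldl max a) := by
  induction vs generalizing a with
  | nil => rfl
  | cons h t ih => simp [pvRun, List.foldl_cons] at ih ⊢; exact ih _

lemma pvRun_none (h : Int) (t : List Int) : pvRun none (h :: t) = some (t.foldl max h) := by
  simp only [pvRun, List.foldl_cons]
  exact pvRun_some t h

lemma pvVals_ne_nil (l : List (String × Int)) (k : String) (h : k ∈ l.map Prod.fst) :
    pvVals l k ≠ [] := by
  obtain ⟨p, hp, hk⟩ := List.mem_map.mp h
  intro hnil
  unfold pvVals at hnil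
  rw [List.map_eq_nil_iff, List.filter_eq_nil_iff] at hnil
  exact hnil p hp (by simp [hk])

theorem create_dict_max_eq (l : List (String × Int)) :
    create_dict_max l = create_dict_max_alt l := by
  unfold create_dict_max create_dict_max_alt
  show (List.foldl pvStepA PySem.Dict.empty l).items
      = List.map (fun p => (p.1, pyMaxList p.2))
        (List.foldl (fun d p => d.modify p.1 [] fun x => x ++ [p.2]) PySem.Dict.empty l).items
  set dA := l.foldl pvStepA (PySem.Dict.empty : PySem.Dict String Int) with hdA
  set g := l.foldl (fun d p => d.modify p.1 [] (· ++ [p.2]))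
      (PySem.Dict.empty : PySem.Dict String (List Int)) with hg
  have hndA : dA.keys.Nodup := by
    rw [hdA, pvStepA_eq]
    exact PySem.Dict.nodup_keys_foldl_insert_key l Prod.fst
      (fun d p => if d.contains p.1 then max (d.getD p.1 0) p.2 else p.2) _
      (by simp [PySem.Dict.keys_empty])
  have hng : g.keys.Nodup := by
    rw [hg]
    exact PySem.Dict.nodup_keys_foldl_modify_key l Prod.fst [] (fun d p => (· ++ [p.2])) _
      (by simp [PySem.Dict.keys_empty])
  have hkA : dA.keys = PySem.Set.update [] (l.map Prod.fst) := by
    rw [hdA, pvStepA_eq, PySem.Dict.keys_foldl_insert_key l Prod.fst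
      (fun d p => if d.contains p.1 then max (d.getD p.1 0) p.2 else p.2), PySem.Dict.keys_empty]
  have hkg : g.keys = PySem.Set.update [] (l.map Prod.fst) := by
    rw [hg, PySem.Dict.keys_foldl_modify_key l Prod.fst [] (fun _ p => (· ++ [p.2])),
      PySem.Dict.keys_empty]
  rw [PySem.Dict.items_eq_map_keys dA hndA 0, PySem.Dict.items_eq_map_keys g hng [],
    List.map_map, hkA, hkg]
  refine List.map_congr_left (fun k hk => ?_)
  have hkmem : k ∈ l.map Prod.fst := by
    have := (PySem.Set.mem_update [] (l.map Prod.fst) k).mp hk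
    simpa using this
  have hgv : g.getD k [] = pvVals l k := by
    rw [hg, PySem.Dict.getD_foldl_modify_append, PySem.Dict.getD_empty]; rfl
  have hAv : dA.getD k 0 = pyMaxList (pvVals l k) := by
    have hget : dA.get? k = pvRun none (pvVals l k) := by
      rw [hdA]
      have := pvFoldA_get? l PySem.Dict.empty k
      rwa [PySem.Dict.get?_empty] at this
    cases hv : pvVals l k with
    | nil => exact absurd hv (pvVals_ne_nil l k hkmem)
    | cons h t =>
      rw [hv, pvRun_none] at hget
      rw [PySem.Dict.getD_of_get?_eq_some dA (0 : Int) hget]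
      rfl
  simp only [Function.comp]
  rw [hAv, hgv]

-- ===== VERDICT (by name: the statement is the Claim_ definition above) =====
theorem create_dict_max_spec : Claim_equal_create_dict_max := by
  intro l _
  unfold Spec_create_dict_max
  exact create_dict_max_eq l
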